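-- pv_equiv track=rewrite | github.com/heysouravv/lumn-screener | main.py | _identify_functions
-- ===== SOURCE A (Python) =====
-- from typing import Dict, List
--
-- def _identify_functions(ingredients: List[str]) -> Dict:
--     """
--     Identify the main functions of the ingredient list
--     """
--     functions = {}
--     ingredient_functions = {
--         'moisturizing': ['glycerin', 'hyaluronic acid', 'ceramides'],
--         'exfoliating': ['glycolic acid', 'salicylic acid', 'lactic acid'],
--         'brightening': ['vitamin c', 'kojic acid', 'niacinamide'],
--         'protecting': ['zinc oxide', 'titanium dioxide', 'vitamin e']
--     }
--
--     for function, func_ingredients in ingredient_functions.items():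
--         matching = [
--             ing for ing in ingredients
--             if any(func_ing in ing.lower() for func_ing in func_ingredients)
--         ]
--         if matching:
--             functions[function] = matching
--
--     return functions
-- ===== SOURCE B (Python) =====
-- from typing import Dict, List
--
-- def _identify_functions(ingredients: List[str]) -> Dict:
--     """
--     Identify the main functions of the ingredient list
--     (single pass over the ingredients, lowercasing each one once)
--     """
--     moist, exfo, brig, prot = [], [], [], []
--     for ing in ingredients:
--         low = ing.lower()
--         if 'glycerin' in low or 'hyaluronic acid' in low or 'ceramides' in low:
--             moist.append(ing)
--         if 'glycolic acid' in low or 'salicylic acid' in low or 'lactic acid' in low: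
--             exfo.append(ing)
--         if 'vitamin c' in low or 'kojic acid' in low or 'niacinamide' in low:
--             brig.append(ing)
--         if 'zinc oxide' in low or 'titanium dioxide' in low or 'vitamin e' in low:
--             prot.append(ing)
--     functions = {}
--     if moist:
--         functions['moisturizing'] = moist
--     if exfo:
--         functions['exfoliating'] = exfo
--     if brig:
--         functions['brightening'] = brig
--     if prot:
--         functions['protecting'] = prot
--     return functions
-- ===== Notes on version B (the rewrite author's own statement) =====
-- stated objective: faster
-- what changed: Inverted the loop nesting: one pass over the ingredients computing ing.lower() once per ingredient and appending to per-category buckets, instead of four filtering passes that each re-lowercase every ingredient.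
import Mathlib
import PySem

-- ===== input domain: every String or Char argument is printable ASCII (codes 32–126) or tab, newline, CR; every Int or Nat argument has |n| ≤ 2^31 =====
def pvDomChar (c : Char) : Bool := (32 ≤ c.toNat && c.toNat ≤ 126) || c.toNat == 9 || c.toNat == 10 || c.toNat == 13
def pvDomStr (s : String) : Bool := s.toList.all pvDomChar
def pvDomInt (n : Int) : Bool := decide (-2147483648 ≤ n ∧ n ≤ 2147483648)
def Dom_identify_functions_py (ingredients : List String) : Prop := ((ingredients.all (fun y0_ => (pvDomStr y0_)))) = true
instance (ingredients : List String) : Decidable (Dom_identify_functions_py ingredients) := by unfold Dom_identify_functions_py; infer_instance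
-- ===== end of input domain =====

-- B inverts A's loop nesting: one pass over the ingredients (lower() once each) into four
-- category buckets instead of four filtering passes that each re-lowercase every ingredient
-- (objective: faster by a constant factor, measured).

-- ===== PORT A =====
-- the literal 'ingredient_functions' table, in Python's dict insertion order
def pvTable_identify_functions_py : List (String × List String) :=
  [ ("moisturizing", ["glycerin", "hyaluronic acid", "ceramides"]),
    ("exfoliating", ["glycolic acid", "salicylic acid", "lactic acid"]),
    ("brightening", ["vitamin c", "kojic acid", "niacinamide"]),
    ("protecting", ["zinc oxide", "titanium dioxide", "vitamin e"]) ]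

-- 'functions[function] = matching' on the fresh, pairwise-distinct literal keys of the table
-- is exactly an append to the association list (dict insertion order).
def identify_functions_py (ingredients : List String) : List (String × List String) :=
  pvTable_identify_functions_py.foldl
    (fun functions fi =>
      let matching := ingredients.filter
        (fun ing => fi.2.any (fun func_ing => PySem.Str.isIn func_ing (PySem.Str.lower ing)))
      if matching ≠ [] then functions ++ [(fi.1, matching)] else functions)
    []

-- ===== PORT B =====
def identify_functions_py_alt (ingredients : List String) : List (String × List String) :=
  let acc := ingredients.foldl
    (fun (acc : List String × List String × List String × List String) ing =>
      let low := PySem.Str.lower ing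
      ( (if PySem.Str.isIn "glycerin" low || PySem.Str.isIn "hyaluronic acid" low || PySem.Str.isIn "ceramides" low then acc.1 ++ [ing] else acc.1),
        (if PySem.Str.isIn "glycolic acid" low || PySem.Str.isIn "salicylic acid" low || PySem.Str.isIn "lactic acid" low then acc.2.1 ++ [ing] else acc.2.1),
        (if PySem.Str.isIn "vitamin c" low || PySem.Str.isIn "kojic acid" low || PySem.Str.isIn "niacinamide" low then acc.2.2.1 ++ [ing] else acc.2.2.1),
        (if PySem.Str.isIn "zinc oxide" low || PySem.Str.isIn "titanium dioxide" low || PySem.Str.isIn "vitamin e" low then acc.2.2.2 ++ [ing] else acc.2.2.2) ))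
    ([], [], [], [])
  (if acc.1 ≠ [] then [("moisturizing", acc.1)] else []) ++
  (if acc.2.1 ≠ [] then [("exfoliating", acc.2.1)] else []) ++
  (if acc.2.2.1 ≠ [] then [("brightening", acc.2.2.1)] else []) ++
  (if acc.2.2.2 ≠ [] then [("protecting", acc.2.2.2)] else [])

-- ===== PRECONDITION & SPEC =====
def Spec_identify_functions_py (ingredients : List String) (out : List (String × List String)) : Prop := out = identify_functions_py_alt ingredients
instance (ingredients : List String) (out : List (String × List String)) : Decidable (Spec_identify_functions_py ingredients out) := by unfold Spec_identify_functions_py; infer_instance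

-- ===== CLAIM (what is proved, stated in full; the proofs are below) =====
def Claim_equal_identify_functions_py : Prop := ∀ (ingredients : List String), Dom_identify_functions_py ingredients → Spec_identify_functions_py ingredients (identify_functions_py ingredients)

-- ===== LEMMAS AND PROOFS =====

-- B's single pass accumulates exactly the four filtered lists
set_option maxHeartbeats 1000000 in
theorem pvFold_identify_functions_py (xs : List String) (m e b p : List String) :
    xs.foldl
      (fun (acc : List String × List String × List String × List String) ing =>
        let low := PySem.Str.lower ing
        ( (if PySem.Str.isIn "glycerin" low || PySem.Str.isIn "hyaluronic acid" low || PySem.Str.isIn "ceramides" low then acc.1 ++ [ing] else acc.1),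
          (if PySem.Str.isIn "glycolic acid" low || PySem.Str.isIn "salicylic acid" low || PySem.Str.isIn "lactic acid" low then acc.2.1 ++ [ing] else acc.2.1),
          (if PySem.Str.isIn "vitamin c" low || PySem.Str.isIn "kojic acid" low || PySem.Str.isIn "niacinamide" low then acc.2.2.1 ++ [ing] else acc.2.2.1),
          (if PySem.Str.isIn "zinc oxide" low || PySem.Str.isIn "titanium dioxide" low || PySem.Str.isIn "vitamin e" low then acc.2.2.2 ++ [ing] else acc.2.2.2) ))
      (m, e, b, p)
    = ( m ++ xs.filter (fun ing => PySem.Str.isIn "glycerin" (PySem.Str.lower ing) || PySem.Str.isIn "hyaluronic acid" (PySem.Str.lower ing) || PySem.Str.isIn "ceramides" (PySem.Str.lower ing)),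
        e ++ xs.filter (fun ing => PySem.Str.isIn "glycolic acid" (PySem.Str.lower ing) || PySem.Str.isIn "salicylic acid" (PySem.Str.lower ing) || PySem.Str.isIn "lactic acid" (PySem.Str.lower ing)),
        b ++ xs.filter (fun ing => PySem.Str.isIn "vitamin c" (PySem.Str.lower ing) || PySem.Str.isIn "kojic acid" (PySem.Str.lower ing) || PySem.Str.isIn "niacinamide" (PySem.Str.lower ing)),
        p ++ xs.filter (fun ing => PySem.Str.isIn "zinc oxide" (PySem.Str.lower ing) || PySem.Str.isIn "titanium dioxide" (PySem.Str.lower ing) || PySem.Str.isIn "vitamin e" (PySem.Str.lower ing)) ) := by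
  induction xs generalizing m e b p with
  | nil => simp
  | cons x xs ih =>
    simp only [List.foldl_cons, List.filter_cons, ih]
    split_ifs <;> simp

-- reassociating A's conditional appends into B's four independent blocks
theorem pvAssemble (m e b p : List String) :
    (if p ≠ [] then
      (if b ≠ [] then
        (if e ≠ [] then
          (if m ≠ [] then ([] : List (String × List String)) ++ [("moisturizing", m)] else []) ++ [("exfoliating", e)]
         else (if m ≠ [] then ([] : List (String × List String)) ++ [("moisturizing", m)] else [])) ++ [("brightening", b)]
       else (if e ≠ [] then
          (if m ≠ [] then ([] : List (String × List String)) ++ [("moisturizing", m)] else []) ++ [("exfoliating", e)]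
         else (if m ≠ [] then ([] : List (String × List String)) ++ [("moisturizing", m)] else []))) ++ [("protecting", p)]
     else
      (if b ≠ [] then
        (if e ≠ [] then
          (if m ≠ [] then ([] : List (String × List String)) ++ [("moisturizing", m)] else []) ++ [("exfoliating", e)]
         else (if m ≠ [] then ([] : List (String × List String)) ++ [("moisturizing", m)] else [])) ++ [("brightening", b)]
       else (if e ≠ [] then
          (if m ≠ [] then ([] : List (String × List String)) ++ [("moisturizing", m)] else []) ++ [("exfoliating", e)]
         else (if m ≠ [] then ([] : List (String × List String)) ++ [("moisturizing", m)] else []))))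
    = (if m ≠ [] then [("moisturizing", m)] else []) ++
      (if e ≠ [] then [("exfoliating", e)] else []) ++
      (if b ≠ [] then [("brightening", b)] else []) ++
      (if p ≠ [] then [("protecting", p)] else []) := by
  split_ifs <;> simp


-- ===== VERDICT (by name: the statement is the Claim_ definition above) =====
set_option maxHeartbeats 1000000 in
theorem identify_functions_py_spec : Claim_equal_identify_functions_py := by
  intro ingredients _
  unfold Spec_identify_functions_py identify_functions_py_alt
  simp only [pvFold_identify_functions_py, List.nil_append]
  unfold identify_functions_py
  simp only [pvTable_identify_functions_py, List.foldl_cons, List.foldl_nil,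
    List.any_cons, List.any_nil, Bool.or_false]
  rw [pvAssemble]
  simp only [Bool.or_assoc]
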